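-- pv_equiv track=rewrite | github.com/augyg/pyPractice | pythonPractice2.py | solution
-- ===== SOURCE A (Python) =====
-- def solution(A):
--     # write your code in Python 3.6
--     east = []
--     west = []
--     for idx, val in enumerate(A):
--         if val == 0:
--             east.append(idx)
--         else:
--             west.append(idx)
--     numPairs = 0
--     lastIndex_v = len(A) - 1
--
--     east.reverse()
--     while east != []:
--         x = east.pop()
--         idx = x
--         o = lastIndex_v - idx - len(east)
--         numPairs += o
--
--
--
--     if numPairs > 1000000000: return -1
--     else:
--         return numPairs
-- ===== SOURCE B (Python) =====
-- def solution(A):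
--     zeros = 0
--     total = 0
--     for v in A:
--         if v == 0:
--             zeros += 1
--         else:
--             total += zeros
--     return -1 if total > 1000000000 else total
-- ===== Notes on version B (the rewrite author's own statement) =====
-- stated objective: simpler
-- what changed: Replaces the two index lists, reverse and pop arithmetic with a single left-to-right scan maintaining a running count of zeros seen so far.
import Mathlib
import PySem

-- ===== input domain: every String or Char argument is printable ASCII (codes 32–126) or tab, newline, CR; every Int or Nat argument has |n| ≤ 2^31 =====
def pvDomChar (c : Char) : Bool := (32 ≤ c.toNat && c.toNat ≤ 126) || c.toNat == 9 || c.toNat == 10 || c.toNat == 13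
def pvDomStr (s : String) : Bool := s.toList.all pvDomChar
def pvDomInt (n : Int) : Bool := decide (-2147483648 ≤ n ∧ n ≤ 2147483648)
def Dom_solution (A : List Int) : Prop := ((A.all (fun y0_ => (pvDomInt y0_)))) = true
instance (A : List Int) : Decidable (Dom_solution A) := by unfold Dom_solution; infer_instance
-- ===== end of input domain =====

-- B replaces A's two index lists, reverse and pop arithmetic by one left-to-right
-- scan with a running count of zeros seen so far (objective: simpler).

-- ===== PORT A =====
-- the for-loop body over enumerate(A): append idx to east or to west
def solStep (p : List Int × List Int) (iv : Int × Int) : List Int × List Int :=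
  if iv.2 = 0 then (p.1 ++ [iv.1], p.2) else (p.1, p.2 ++ [iv.1])

-- the while loop: pop from the end of east, add lastIndex_v - idx - len(east)
def solLoop (lastIndex_v : Int) (east : List Int) (numPairs : Int) : Int :=
  match _h : PySem.List.pop? east (-1) with
  | none => numPairs                    -- east == []
  | some (x, east') =>
      solLoop lastIndex_v east' (numPairs + (lastIndex_v - x - (east'.length : Int)))
termination_by east.length
decreasing_by
  have := PySem.List.length_of_pop?_eq_some east _h
  simp at this; omega

def solution (A : List Int) : Int :=
  let ew := (PySem.List.enumerate A 0).foldl solStep ([], [])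
  let lastIndex_v : Int := (A.length : Int) - 1
  let east := ew.1.reverse
  let numPairs := solLoop lastIndex_v east 0
  if numPairs > 1000000000 then -1 else numPairs

-- ===== PORT B =====
def solution_alt (A : List Int) : Int :=
  let zt := A.foldl (fun (p : Int × Int) v => if v = 0 then (p.1 + 1, p.2) else (p.1, p.2 + p.1)) (0, 0)
  if zt.2 > 1000000000 then -1 else zt.2

-- ===== PRECONDITION & SPEC =====
def Spec_solution (A : List Int) (out : Int) : Prop := out = solution_alt A
instance (A : List Int) (out : Int) : Decidable (Spec_solution A out) := by unfold Spec_solution; infer_instance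

-- ===== CLAIM (what is proved, stated in full; the proofs are below) =====
def Claim_equal_solution : Prop := ∀ (A : List Int), Dom_solution A → Spec_solution A (solution A)

-- ===== LEMMAS AND PROOFS =====

-- zero indices of A counting positions from k (value of A's east list)
def pvZi : List Int → Int → List Int
  | [], _ => []
  | a :: t, k => if a = 0 then k :: pvZi t (k + 1) else pvZi t (k + 1)

-- number of zeros / nonzeros, as Int
def pvZ : List Int → Int
  | [] => 0
  | a :: t => (if a = 0 then 1 else 0) + pvZ t

def pvN : List Int → Int
  | [] => 0
  | a :: t => (if a = 0 then 0 else 1) + pvN t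

-- pair count: each leading zero pairs with every nonzero after it
def pvC : List Int → Int
  | [] => 0
  | a :: t => (if a = 0 then pvN t else 0) + pvC t

lemma pvZi_length : ∀ (A : List Int) (k : Int), ((pvZi A k).length : Int) = pvZ A := by
  intro A
  induction A with
  | nil => intro k; simp [pvZi, pvZ]
  | cons a t ih =>
      intro k
      by_cases h : a = 0 <;> simp [pvZi, pvZ, h, ih]
      omega

lemma pvLen_split : ∀ (A : List Int), (A.length : Int) = pvZ A + pvN A := by
  intro A
  induction A with
  | nil => simp [pvZ, pvN]
  | cons a t ih =>
      by_cases h : a = 0 <;> simp [pvZ, pvN, h] <;> omega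

-- A's fold over enumerate builds exactly the zero-index list (first component)
lemma fold_fst : ∀ (A : List Int) (k : Int) (e w : List Int),
    ((PySem.List.enumerate A k).foldl solStep (e, w)).1 = e ++ pvZi A k := by
  intro A
  induction A with
  | nil => intro k e w; simp [PySem.List.enumerate_nil, pvZi]
  | cons a t ih =>
      intro k e w
      rw [PySem.List.enumerate_cons]
      by_cases h : a = 0 <;> simp [List.foldl_cons, solStep, h, pvZi, ih]

-- A's while loop on '[]' and on a reversed cons: pop takes the last element
lemma solLoop_nil (l n : Int) : solLoop l [] n = n := by
  rw [solLoop]; simp [PySem.List.pop?, PySem.List.pyIdx?]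

lemma solLoop_rev_cons (l n e : Int) (t : List Int) :
    solLoop l (e :: t).reverse n = solLoop l t.reverse (n + (l - e - (t.length : Int))) := by
  have hp : PySem.List.pop? ((e :: t).reverse) (-1) = some (e, t.reverse) := by
    rw [List.reverse_cons]; exact PySem.List.pop?_last t.reverse e
  rw [solLoop]
  split
  · rename_i heq; rw [hp] at heq; exact absurd heq (by simp)
  · rename_i x east' heq
    rw [hp] at heq
    simp only [Option.some.injEq, Prod.mk.injEq] at heq
    rw [← heq.1, ← heq.2, List.length_reverse]

-- the while loop on the zero indices computes the pair count
lemma solLoop_zi : ∀ (A : List Int) (k n l : Int), l = k + (A.length : Int) - 1 →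
    solLoop l (pvZi A k).reverse n = n + pvC A := by
  intro A
  induction A with
  | nil =>
      intro k n l _
      rw [show pvZi [] k = [] from rfl]
      simp [solLoop_nil, pvC]
  | cons a t ih =>
      intro k n l hl
      simp only [List.length_cons] at hl
      push_cast at hl
      by_cases h : a = 0
      · rw [show pvZi (a :: t) k = k :: pvZi t (k + 1) by simp [pvZi, h]]
        rw [solLoop_rev_cons, pvZi_length]
        rw [ih (k + 1) _ l (by omega)]
        have hsplit := pvLen_split t
        simp [pvC, h]
        omega
      · rw [show pvZi (a :: t) k = pvZi t (k + 1) by simp [pvZi, h]]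
        rw [ih (k + 1) n l (by omega)]
        simp [pvC, h]

-- B's fold invariant
lemma alt_fold : ∀ (A : List Int) (z t : Int),
    A.foldl (fun (p : Int × Int) v => if v = 0 then (p.1 + 1, p.2) else (p.1, p.2 + p.1)) (z, t)
      = (z + pvZ A, t + z * pvN A + pvC A) := by
  intro A
  induction A with
  | nil => intro z t; simp [pvZ, pvN, pvC]
  | cons a s ih =>
      intro z t
      rw [List.foldl_cons]
      by_cases h : a = 0
      · simp only [h, if_true]
        rw [ih]
        refine Prod.ext ?_ ?_ <;> simp [pvZ, pvN, pvC] <;> ring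
      · simp only [h, if_false]
        rw [ih]
        refine Prod.ext ?_ ?_ <;> simp [pvZ, pvN, pvC, h]
        ring

lemma solution_eq_pvC (A : List Int) :
    solution A = if pvC A > 1000000000 then -1 else pvC A := by
  unfold solution
  simp only []
  rw [fold_fst A 0 [] []]
  simp only [List.nil_append]
  rw [solLoop_zi A 0 0 ((A.length : Int) - 1) (by omega)]
  simp

lemma solution_alt_eq_pvC (A : List Int) :
    solution_alt A = if pvC A > 1000000000 then -1 else pvC A := by
  unfold solution_alt
  rw [alt_fold A 0 0]
  simp

-- ===== VERDICT (by name: the statement is the Claim_ definition above) =====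
theorem solution_spec : Claim_equal_solution := by
  intro A _
  unfold Spec_solution
  rw [solution_eq_pvC, solution_alt_eq_pvC]
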